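-- pv_equiv track=rewrite | github.com/slidracoon72/leetcode | WordSubsets.py | wordSubsets2
-- ===== SOURCE A (Python) =====
-- from typing import List
--
-- def wordSubsets2(words1: List[str], words2: List[str]) -> List[str]:
--     res = []
--     for word in words1:
--         flag = True
--         for sub in words2:
--             i, j = 0, 0
--             while i < len(word) and j < len(sub):
--                 if word[i] == sub[j]:
--                     j += 1
--                 i += 1
--             if j != len(sub):
--                 flag = False
--                 break
--         if flag:
--             res.append(word)
--
--     return res
-- ===== SOURCE B (Python) =====
-- from typing import List
--
-- def _covers(pos, sub):
--     # greedy subsequence test over per-character index lists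
--     last = -1
--     for c in sub:
--         nxt = None
--         for p in pos.get(c, []):
--             if p > last:
--                 nxt = p
--                 break
--         if nxt is None:
--             return False
--         last = nxt
--     return True
--
-- def wordSubsets2(words1: List[str], words2: List[str]) -> List[str]:
--     res = []
--     for word in words1:
--         pos = {}
--         for i, ch in enumerate(word):
--             pos.setdefault(ch, []).append(i)
--         if all(_covers(pos, sub) for sub in words2):
--             res.append(word)
--     return res
-- ===== Notes on version B (the rewrite author's own statement) =====
-- stated objective: alternative
-- what changed: Replaces A's per-(word,sub) two-pointer scan over the word by building, once per word, a dict mapping each character to its ascending index list and testing each sub greedily against those lists with a last-matched-position cursor.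
import Mathlib
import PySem

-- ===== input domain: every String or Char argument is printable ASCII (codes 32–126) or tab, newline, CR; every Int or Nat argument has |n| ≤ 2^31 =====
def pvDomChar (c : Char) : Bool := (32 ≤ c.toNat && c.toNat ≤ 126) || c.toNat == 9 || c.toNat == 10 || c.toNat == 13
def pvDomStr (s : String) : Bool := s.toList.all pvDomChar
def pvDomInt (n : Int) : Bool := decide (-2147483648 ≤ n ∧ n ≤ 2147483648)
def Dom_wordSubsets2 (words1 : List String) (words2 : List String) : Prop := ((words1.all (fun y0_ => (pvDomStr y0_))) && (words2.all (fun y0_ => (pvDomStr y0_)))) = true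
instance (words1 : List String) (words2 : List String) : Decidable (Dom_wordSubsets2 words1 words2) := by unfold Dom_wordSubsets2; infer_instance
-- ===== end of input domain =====

-- B replaces A's per-sub two-pointer scan of the word by a per-word dict of
-- character index lists, testing each sub greedily against those lists
-- (objective: alternative decomposition, same results).

-- ===== PORT A =====
-- strings are handled as their character lists (PySem string ops are defined over List Char; exact)

-- the 'while i < len(word) and j < len(sub)' loop; returns the final j
def aLoop (w s : List Char) (i j : Nat) : Nat :=
  if _h : i < w.length ∧ j < s.length then
    aLoop w s (i + 1)
      (if PySem.List.pyGet? w (i : Int) == PySem.List.pyGet? s (j : Int) then j + 1 else j)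
  else j
termination_by w.length - i
decreasing_by omega

-- the 'for sub in words2' loop with the flag/break
def aCheck (w : List Char) (subs : List String) : Bool :=
  match subs with
  | [] => true
  | sub :: rest =>
      if aLoop w sub.toList 0 0 ≠ sub.toList.length then false else aCheck w rest

def wordSubsets2 (words1 : List String) (words2 : List String) : List String :=
  words1.foldl (fun res word => if aCheck word.toList words2 then res ++ [word] else res) []

-- ===== PORT B =====
-- 'for p in pos.get(c, []): if p > last: …; break' — first index strictly after last
def findGT (lst : List Int) (last : Int) : Option Int :=
  match lst with
  | [] => none
  | p :: rest => if p > last then some p else findGT rest last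

-- 'pos = {}; for i, ch in enumerate(word): pos.setdefault(ch, []).append(i)'
def buildPos (w : List Char) : PySem.Dict Char (List Int) :=
  (PySem.List.enumerate w).foldl (fun d p => d.modify p.2 [] (· ++ [p.1])) PySem.Dict.empty

-- '_covers': greedy walk of sub through the index lists ('return False' = false)
def covers (pos : PySem.Dict Char (List Int)) (s : List Char) (last : Int) : Bool :=
  match s with
  | [] => true
  | c :: rest =>
      match findGT (pos.getD c []) last with
      | none => false
      | some p => covers pos rest p

def wordSubsets2_alt (words1 : List String) (words2 : List String) : List String :=
  words1.foldl
    (fun res word =>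
      let pos := buildPos word.toList
      if words2.all (fun sub => covers pos sub.toList (-1)) then res ++ [word] else res) []

-- ===== CLAIM (what is proved, stated in full; the proofs are below) =====
def Spec_wordSubsets2 (words1 : List String) (words2 : List String) (out : List String) : Prop := out = wordSubsets2_alt words1 words2
instance (words1 : List String) (words2 : List String) (out : List String) : Decidable (Spec_wordSubsets2 words1 words2 out) := by unfold Spec_wordSubsets2; infer_instance

def Claim_equal_wordSubsets2 : Prop := ∀ (words1 : List String) (words2 : List String), Dom_wordSubsets2 words1 words2 → Spec_wordSubsets2 words1 words2 (wordSubsets2 words1 words2)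

-- ===== LEMMAS AND PROOFS =====

-- canonical subsequence test both checks are reduced to
def sub? : List Char → List Char → Bool
  | _, [] => true
  | [], _ :: _ => false
  | x :: w', c :: s' => if x = c then sub? w' s' else sub? w' (c :: s')

theorem sub?_nil_left (s : List Char) (h : s ≠ []) : sub? [] s = false := by
  cases s with
  | nil => exact absurd rfl h
  | cons c s' => rfl

-- A's two-pointer loop decides sub? on the remaining suffixes
theorem aLoop_eq_iff (w s : List Char) (i j : Nat) (hj : j ≤ s.length) :
    (aLoop w s i j = s.length) ↔ sub? (w.drop i) (s.drop j) = true := by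
  have H : ∀ (n i j : Nat), w.length - i ≤ n → j ≤ s.length →
      ((aLoop w s i j = s.length) ↔ sub? (w.drop i) (s.drop j) = true) := by
    intro n
    induction n with
    | zero =>
      intro i j hn hj
      have hi : ¬ i < w.length := by omega
      rw [aLoop, dif_neg (by tauto)]
      have hwd : w.drop i = [] := List.drop_eq_nil_of_le (by omega)
      by_cases hjs : j = s.length
      · subst hjs; simp [hwd, sub?]
      · rw [hwd, sub?_nil_left _ (by rw [Ne, List.drop_eq_nil_iff]; omega)]
        simp [hjs]
    | succ n ihn =>
      intro i j hn hj
      rw [aLoop]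
      by_cases h : i < w.length ∧ j < s.length
      · obtain ⟨hi, hjlt⟩ := h
        rw [dif_pos ⟨hi, hjlt⟩]
        rw [List.drop_eq_getElem_cons hi, List.drop_eq_getElem_cons hjlt]
        have hget : (PySem.List.pyGet? w (i : Int) == PySem.List.pyGet? s (j : Int)) = (w[i] == s[j]) := by
          simp [pysem, hi, hjlt]
        rw [hget]
        by_cases hc : w[i] = s[j]
        · have hb : (w[i] == s[j]) = true := by simp [hc]
          rw [hb, if_pos rfl]
          have hred : sub? (w[i] :: List.drop (i + 1) w) (s[j] :: List.drop (j + 1) s)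
              = sub? (List.drop (i + 1) w) (List.drop (j + 1) s) := by
            simp [sub?, hc]
          rw [hred]
          exact ihn (i + 1) (j + 1) (by omega) (by omega)
        · have hb : (w[i] == s[j]) = false := by simp [hc]
          rw [hb]
          have hred : sub? (w[i] :: List.drop (i + 1) w) (s[j] :: List.drop (j + 1) s)
              = sub? (List.drop (i + 1) w) (List.drop j s) := by
            simp only [sub?, if_neg hc]
            rw [← List.drop_eq_getElem_cons hjlt]
          rw [hred]
          exact ihn (i + 1) j (by omega) hj
      · rw [dif_neg h]
        by_cases hjs : j = s.length
        · subst hjs; simp [sub?]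
        · have hjlt : j < s.length := lt_of_le_of_ne hj hjs
          have hi : ¬ i < w.length := by tauto
          have hwd : w.drop i = [] := List.drop_eq_nil_of_le (by omega)
          rw [hwd, sub?_nil_left _ (by rw [Ne, List.drop_eq_nil_iff]; omega)]
          simp [hjs]
  exact H (w.length - i) i j (by omega) hj

-- skipping to the first occurrence is what sub? does on a cons
theorem sub?_skip (u : List Char) (c : Char) (rest : List Char) :
    sub? u (c :: rest) =
      (match u.findIdx? (· == c) with
       | none => false
       | some k => sub? (u.drop (k + 1)) rest) := by
  induction u with
  | nil => simp [sub?_nil_left, List.findIdx?_nil]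
  | cons x u' ih =>
    rw [List.findIdx?_cons]
    by_cases hc : x = c
    · simp [sub?, hc]
    · have hb : (x == c) = false := by simp [hc]
      simp only [sub?, if_neg hc, hb, Bool.false_eq_true, if_false, ih]
      cases u'.findIdx? (· == c) <;> simp

-- the dict B builds holds, for each character, its ascending index list
theorem buildPos_getD (w : List Char) (c : Char) :
    (buildPos w).getD c [] =
      ((PySem.List.enumerate w).filter (fun p => p.2 == c)).map (·.1) := by
  unfold buildPos
  have hmap : (PySem.List.enumerate w).foldl (fun d p => d.modify p.2 [] (· ++ [p.1])) PySem.Dict.empty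
      = ((PySem.List.enumerate w).map (fun p => (p.2, p.1))).foldl
          (fun d p => d.modify p.1 [] (· ++ [p.2])) PySem.Dict.empty := by
    rw [List.foldl_map]
  rw [hmap, PySem.Dict.getD_foldl_modify_append]
  simp [List.filter_map, Function.comp_def]

-- recursive description of 'first index > last whose character is c'
def firstGT (w : List Char) (c : Char) (m last : Int) : Option Int :=
  match w with
  | [] => none
  | x :: w' => if x = c ∧ last < m then some m else firstGT w' c (m + 1) last

theorem findGT_enumerate (w : List Char) (c : Char) (m last : Int) :
    findGT (((PySem.List.enumerate w m).filter (fun p => p.2 == c)).map (·.1)) last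
      = firstGT w c m last := by
  induction w generalizing m with
  | nil => rfl
  | cons x w' ih =>
    rw [PySem.List.enumerate_cons]
    by_cases hc : x = c
    · subst hc
      by_cases hl : last < m
      · simp [findGT, firstGT, hl]
      · simp [findGT, firstGT, hl, ih]
    · have hb : (x == c) = false := by simp [hc]
      simp [firstGT, hc, hb, ih]

-- the threshold is irrelevant once it lies below every remaining index
theorem firstGT_congr (w : List Char) (c : Char) (m l1 l2 : Int)
    (h1 : l1 < m) (h2 : l2 < m) : firstGT w c m l1 = firstGT w c m l2 := by
  induction w generalizing m with
  | nil => rfl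
  | cons x w' ih =>
    simp only [firstGT, h1, h2, and_true]
    exact if_congr Iff.rfl rfl (ih (m + 1) (by omega) (by omega))

theorem firstGT_drop (w : List Char) (c : Char) (m : Int) (t : Nat) :
    firstGT w c m ((m + t) - 1) =
      (match (w.drop t).findIdx? (· == c) with
       | none => none
       | some k => some (m + t + k)) := by
  induction w generalizing m t with
  | nil => simp [firstGT, List.findIdx?_nil]
  | cons x w' ih =>
    cases t with
    | zero =>
      rw [List.drop_zero, List.findIdx?_cons]
      by_cases hc : x = c
      · simp [firstGT, hc]
      · have hb : (x == c) = false := by simp [hc]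
        have hcg : firstGT w' c (m + 1) (m + (0:Nat) - 1) = firstGT w' c (m + 1) ((m + 1) + (0:Nat) - 1) :=
          firstGT_congr w' c (m + 1) _ _ (by omega) (by omega)
        rw [show firstGT (x :: w') c m (m + (0:Nat) - 1)
              = firstGT w' c (m + 1) (m + (0:Nat) - 1) by
            rw [firstGT, if_neg (by tauto)]]
        rw [hcg, ih (m + 1) 0, List.drop_zero, hb]
        cases hk : w'.findIdx? (· == c) with
        | none => rfl
        | some k => simp; omega
    | succ t' =>
      have hcond : ¬ (x = c ∧ (m + (t' + 1 : Nat)) - 1 < m) := by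
        push_cast; omega
      rw [show firstGT (x :: w') c m (m + (t' + 1 : Nat) - 1)
            = firstGT w' c (m + 1) (m + (t' + 1 : Nat) - 1) by
          rw [firstGT, if_neg hcond]]
      have harg : m + (t' + 1 : Nat) - 1 = (m + 1) + (t' : Nat) - 1 := by push_cast; omega
      rw [harg, ih (m + 1) t', List.drop_succ_cons]
      cases hk : (w'.drop t').findIdx? (· == c) with
      | none => rfl
      | some k => simp; omega

-- B's greedy walk from threshold t-1 decides sub? on the word's suffix from t
theorem covers_eq_sub? (s : List Char) (w : List Char) (t : Nat) :
    covers (buildPos w) s ((t : Int) - 1) = sub? (w.drop t) s := by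
  induction s generalizing t with
  | nil => simp [covers, sub?]
  | cons c rest ih =>
    have h0 : ((0:Int) + t) - 1 = (t : Int) - 1 := by omega
    rw [sub?_skip]
    simp only [covers, buildPos_getD]
    have henum : PySem.List.enumerate w = PySem.List.enumerate w 0 := rfl
    rw [henum, findGT_enumerate, ← h0, firstGT_drop]
    cases hf : (w.drop t).findIdx? (· == c) with
    | none => rfl
    | some k =>
      have hp : (0:Int) + t + k = ((t + k + 1 : Nat) : Int) - 1 := by push_cast; omega
      simp only [hp, ih]
      have hd : List.drop (k + 1) (List.drop t w) = List.drop (t + k + 1) w := by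
        rw [List.drop_drop]; congr 1
      rw [hd]

-- A's checked condition for one sub equals B's
theorem aCheck_eq_all (w : List Char) (subs : List String) :
    aCheck w subs = subs.all (fun sub => covers (buildPos w) sub.toList (-1)) := by
  induction subs with
  | nil => rfl
  | cons sub rest ih =>
    have hone : covers (buildPos w) sub.toList (-1) = sub? w sub.toList := by
      simpa using covers_eq_sub? sub.toList w 0
    rw [List.all_cons, hone, aCheck, ih]
    by_cases h : aLoop w sub.toList 0 0 = sub.toList.length
    · have hs : sub? w sub.toList = true := by
        simpa using (aLoop_eq_iff w sub.toList 0 0 (by omega)).mp h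
      rw [if_neg (not_not_intro h), hs, Bool.true_and]
    · have hs : sub? w sub.toList = false := by
        cases hb : sub? w sub.toList
        · rfl
        · exact absurd ((aLoop_eq_iff w sub.toList 0 0 (by omega)).mpr (by simpa using hb)) h
      rw [if_pos h, hs, Bool.false_and]

-- ===== VERDICT (by name: the statement is the Claim_ definition above) =====
theorem wordSubsets2_spec : Claim_equal_wordSubsets2 := by
  intro words1 words2 _
  unfold Spec_wordSubsets2 wordSubsets2 wordSubsets2_alt
  congr 1
  funext res word
  rw [aCheck_eq_all]
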